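-- pv_equiv track=rewrite | github.com/mcdowellj43/Argus_backend | web/backend/modules/risk_calculator.py | _analyze_risk_factors
-- ===== SOURCE A (Python) =====
-- def _analyze_risk_factors(findings):
--     """Analyze key risk factors"""
--     risk_factors = {
--         'data_exposure_risk': False,
--         'active_threats': False,
--         'configuration_issues': False,
--         'large_attack_surface': False,
--         'compliance_concerns': False
--     }
--
--     # Check for data exposure
--     data_exposure_categories = ['Information Disclosure']
--     if any(f.get('category') in data_exposure_categories and f.get('severity') in ['critical', 'high']
--            for f in findings):
--         risk_factors['data_exposure_risk'] = True
--
--     # Check for active threats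
--     if any(f.get('category') == 'Threat Intelligence' and f.get('severity') in ['critical', 'high']
--            for f in findings):
--         risk_factors['active_threats'] = True
--
--     # Check for configuration issues
--     config_categories = ['Security Configuration']
--     config_issues = [f for f in findings if f.get('category') in config_categories]
--     if len(config_issues) > 3:
--         risk_factors['configuration_issues'] = True
--
--     # Check for large attack surface
--     surface_categories = ['Attack Surface Expansion', 'Network & Infrastructure']
--     surface_findings = [f for f in findings if f.get('category') in surface_categories]
--     if len(surface_findings) > 5:
--         risk_factors['large_attack_surface'] = True
--
--     # Check for compliance concerns
--     if any(f.get('category') == 'Compliance & Privacy' and f.get('severity') in ['medium', 'high']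
--            for f in findings):
--         risk_factors['compliance_concerns'] = True
--
--     return risk_factors
-- ===== SOURCE B (Python) =====
-- def _analyze_risk_factors(findings):
--     """Analyze key risk factors (single pass over findings)."""
--     config_count = 0
--     surface_count = 0
--     data_exposure = False
--     active_threats = False
--     compliance = False
--     for f in findings:
--         cat = f.get('category')
--         sev = f.get('severity')
--         if cat == 'Security Configuration':
--             config_count += 1
--         elif cat in ('Attack Surface Expansion', 'Network & Infrastructure'):
--             surface_count += 1
--         elif cat == 'Information Disclosure' and sev in ('critical', 'high'):
--             data_exposure = True
--         elif cat == 'Threat Intelligence' and sev in ('critical', 'high'):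
--             active_threats = True
--         elif cat == 'Compliance & Privacy' and sev in ('medium', 'high'):
--             compliance = True
--     return {
--         'data_exposure_risk': data_exposure,
--         'active_threats': active_threats,
--         'configuration_issues': config_count > 3,
--         'large_attack_surface': surface_count > 5,
--         'compliance_concerns': compliance,
--     }
-- ===== Notes on version B (the rewrite author's own statement) =====
-- stated objective: alternative
-- what changed: Replaces A's five separate scans (three any-generators and two filter-then-len passes) with a single loop over findings that maintains two counters and three boolean flags in mutually exclusive category branches.
import Mathlib
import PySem

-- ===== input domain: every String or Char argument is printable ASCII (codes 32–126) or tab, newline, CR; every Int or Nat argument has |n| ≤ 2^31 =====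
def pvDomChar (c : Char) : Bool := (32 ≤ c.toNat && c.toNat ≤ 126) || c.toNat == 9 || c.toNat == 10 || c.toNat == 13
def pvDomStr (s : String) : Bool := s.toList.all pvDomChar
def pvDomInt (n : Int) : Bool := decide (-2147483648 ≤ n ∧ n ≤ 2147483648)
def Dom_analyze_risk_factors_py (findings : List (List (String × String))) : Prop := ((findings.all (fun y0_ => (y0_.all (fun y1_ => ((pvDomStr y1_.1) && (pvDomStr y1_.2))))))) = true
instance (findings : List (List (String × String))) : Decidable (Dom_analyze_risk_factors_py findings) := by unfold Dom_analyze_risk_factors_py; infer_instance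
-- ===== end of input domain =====

-- B replaces A's five separate scans over findings with one single-pass loop keeping two counters and three flags (objective: alternative decomposition).


-- ===== PORT A =====
-- f.get(k) on a Python dict → first-match lookup on the association list
def pvGetKey (f : List (String × String)) (k : String) : Option String :=
  (PySem.Dict.mk f).get? k

-- Python 'o in [s1, s2, …]' where o is the Option-valued .get result (None is in no string list)
def pvOptIn (o : Option String) (l : List String) : Bool :=
  match o with
  | some s => l.contains s
  | none => false

def analyze_risk_factors_py (findings : List (List (String × String))) : List (String × Bool) :=
  -- risk_factors starts all-False; each 'if any(...)' / 'if len(...) > k' sets one key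
  let data_exposure_risk :=
    findings.any (fun f => pvOptIn (pvGetKey f "category") ["Information Disclosure"] &&
                           pvOptIn (pvGetKey f "severity") ["critical", "high"])
  let active_threats :=
    findings.any (fun f => (pvGetKey f "category" == some "Threat Intelligence") &&
                           pvOptIn (pvGetKey f "severity") ["critical", "high"])
  let config_issues := findings.filter (fun f => pvOptIn (pvGetKey f "category") ["Security Configuration"])
  let configuration_issues := decide (config_issues.length > 3)
  let surface_findings := findings.filter (fun f =>
      pvOptIn (pvGetKey f "category") ["Attack Surface Expansion", "Network & Infrastructure"])
  let large_attack_surface := decide (surface_findings.length > 5)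
  let compliance_concerns :=
    findings.any (fun f => (pvGetKey f "category" == some "Compliance & Privacy") &&
                           pvOptIn (pvGetKey f "severity") ["medium", "high"])
  [("data_exposure_risk", data_exposure_risk),
   ("active_threats", active_threats),
   ("configuration_issues", configuration_issues),
   ("large_attack_surface", large_attack_surface),
   ("compliance_concerns", compliance_concerns)]

-- ===== PORT B =====
-- single pass: state = (config_count, surface_count, data_exposure, active_threats, compliance)
def pvStep (s : Int × Int × Bool × Bool × Bool) (f : List (String × String)) :
    Int × Int × Bool × Bool × Bool :=
  let cat := pvGetKey f "category"
  let sev := pvGetKey f "severity"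
  let (cfg, surf, de, at_, cc) := s
  if cat == some "Security Configuration" then (cfg + 1, surf, de, at_, cc)
  else if pvOptIn cat ["Attack Surface Expansion", "Network & Infrastructure"] then
    (cfg, surf + 1, de, at_, cc)
  else if cat == some "Information Disclosure" && pvOptIn sev ["critical", "high"] then
    (cfg, surf, true, at_, cc)
  else if cat == some "Threat Intelligence" && pvOptIn sev ["critical", "high"] then
    (cfg, surf, de, true, cc)
  else if cat == some "Compliance & Privacy" && pvOptIn sev ["medium", "high"] then
    (cfg, surf, de, at_, true)
  else s

def analyze_risk_factors_py_alt (findings : List (List (String × String))) : List (String × Bool) :=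
  let (cfg, surf, de, at_, cc) := findings.foldl pvStep (0, 0, false, false, false)
  [("data_exposure_risk", de),
   ("active_threats", at_),
   ("configuration_issues", decide (cfg > 3)),
   ("large_attack_surface", decide (surf > 5)),
   ("compliance_concerns", cc)]

-- ===== PRECONDITION & SPEC =====
def Spec_analyze_risk_factors_py (findings : List (List (String × String))) (out : List (String × Bool)) : Prop := out = analyze_risk_factors_py_alt findings
instance (findings : List (List (String × String))) (out : List (String × Bool)) : Decidable (Spec_analyze_risk_factors_py findings out) := by unfold Spec_analyze_risk_factors_py; infer_instance

-- ===== CLAIM (what is proved, stated in full; the proofs are below) =====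
def Claim_equal_analyze_risk_factors_py : Prop := ∀ (findings : List (List (String × String))), Dom_analyze_risk_factors_py findings → Spec_analyze_risk_factors_py findings (analyze_risk_factors_py findings)

-- ===== LEMMAS AND PROOFS =====
-- characterisation of the single-pass fold in terms of A's five scans
theorem pvOptIn_singleton (o : Option String) (s : String) :
    pvOptIn o [s] = (o == some s) := by
  cases o with
  | none => rfl
  | some v =>
    simp only [pvOptIn, List.contains_cons, List.contains_nil, Bool.or_false]
    rw [Bool.eq_iff_iff]; simp

theorem pvStep_eq (cfg surf : Int) (de at_ cc : Bool) (f : List (String × String)) :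
    pvStep (cfg, surf, de, at_, cc) f =
      (if pvGetKey f "category" == some "Security Configuration" then (cfg + 1, surf, de, at_, cc)
       else if pvOptIn (pvGetKey f "category") ["Attack Surface Expansion", "Network & Infrastructure"] then (cfg, surf + 1, de, at_, cc)
       else if pvGetKey f "category" == some "Information Disclosure" && pvOptIn (pvGetKey f "severity") ["critical", "high"] then (cfg, surf, true, at_, cc)
       else if pvGetKey f "category" == some "Threat Intelligence" && pvOptIn (pvGetKey f "severity") ["critical", "high"] then (cfg, surf, de, true, cc)
       else if pvGetKey f "category" == some "Compliance & Privacy" && pvOptIn (pvGetKey f "severity") ["medium", "high"] then (cfg, surf, de, at_, true)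
       else (cfg, surf, de, at_, cc)) := rfl

-- characterisation of the single-pass fold in terms of A's five scans
theorem pvFold_char (findings : List (List (String × String)))
    (cfg surf : Int) (de at_ cc : Bool) :
    findings.foldl pvStep (cfg, surf, de, at_, cc) =
      (cfg + (findings.countP (fun f => pvGetKey f "category" == some "Security Configuration") : Int),
       surf + (findings.countP (fun f =>
          pvOptIn (pvGetKey f "category") ["Attack Surface Expansion", "Network & Infrastructure"]) : Int),
       de || findings.any (fun f => (pvGetKey f "category" == some "Information Disclosure") &&
                           pvOptIn (pvGetKey f "severity") ["critical", "high"]),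
       at_ || findings.any (fun f => (pvGetKey f "category" == some "Threat Intelligence") &&
                           pvOptIn (pvGetKey f "severity") ["critical", "high"]),
       cc || findings.any (fun f => (pvGetKey f "category" == some "Compliance & Privacy") &&
                           pvOptIn (pvGetKey f "severity") ["medium", "high"])) := by
  induction findings generalizing cfg surf de at_ cc with
  | nil => simp
  | cons f rest ih =>
    simp only [List.foldl_cons, List.countP_cons, List.any_cons, pvStep_eq]
    split_ifs with h1 h2 h3 h4 h5 <;> rw [ih] <;> clear ih <;>
      by_cases hA : pvGetKey f "category" = some "Information Disclosure" <;>
      by_cases hB : pvGetKey f "category" = some "Threat Intelligence" <;>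
      by_cases hC : pvGetKey f "category" = some "Compliance & Privacy" <;>
      simp_all [Prod.ext_iff, pvOptIn, beq_eq_decide] <;> omega

-- ===== VERDICT (by name: the statement is the Claim_ definition above) =====
theorem analyze_risk_factors_py_spec : Claim_equal_analyze_risk_factors_py := by
  intro findings _
  unfold Spec_analyze_risk_factors_py analyze_risk_factors_py analyze_risk_factors_py_alt
  rw [pvFold_char]
  simp [← List.countP_eq_length_filter, pvOptIn_singleton]
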